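-- pv_equiv track=rewrite | github.com/defenceapp/defenceblocklistupdater | main.py | all_possible_subs
-- ===== SOURCE A (Python) =====
-- def all_possible_subs(domain, subs):
--     domains = set()
--     for i in range(len(domain)):
--         subdomain = domain[0:i] + domain[i+1:len(domain)]
--         domains.add(subdomain)
--         if subs > 1:
--             domains = domains.union(all_possible_subs(subdomain, subs-1))
--     return sorted(list(domains))
-- ===== SOURCE B (Python) =====
-- def all_possible_subs(domain, subs):
--     # BFS by deletion count: level j holds every string reachable by deleting
--     # exactly j characters; no overlapping recursive recomputation.
--     depth = min(max(subs, 1), len(domain))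
--     result = set()
--     level = {domain}
--     for _ in range(depth):
--         nxt = set()
--         for s in level:
--             for i in range(len(s)):
--                 nxt.add(s[:i] + s[i+1:])
--         result |= nxt
--         level = nxt
--     return sorted(result)
-- ===== Notes on version B (the rewrite author's own statement) =====
-- stated objective: alternative
-- what changed: Replaces the overlapping exponential recursion (re-deriving the same subdomains along every deletion order) with a breadth-first sweep over deletion levels where each level is a deduplicated set expanded once; intended as faster (a timing run read 3.33x at the largest size both finished, but could not confirm since beyond that both are bound by the output size), recorded as faster: none.
import Mathlib
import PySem

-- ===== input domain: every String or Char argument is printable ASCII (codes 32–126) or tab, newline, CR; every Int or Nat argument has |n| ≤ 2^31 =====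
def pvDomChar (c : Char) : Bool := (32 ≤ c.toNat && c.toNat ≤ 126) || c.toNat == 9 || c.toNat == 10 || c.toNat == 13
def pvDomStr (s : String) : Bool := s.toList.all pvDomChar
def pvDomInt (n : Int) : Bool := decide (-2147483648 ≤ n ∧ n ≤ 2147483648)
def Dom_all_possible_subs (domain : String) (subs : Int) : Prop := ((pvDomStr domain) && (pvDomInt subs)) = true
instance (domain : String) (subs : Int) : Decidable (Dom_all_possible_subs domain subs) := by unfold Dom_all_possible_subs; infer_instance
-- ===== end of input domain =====

-- B replaces A's overlapping exponential recursion by a breadth-first sweep over deletion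
-- levels (each level a deduplicated set expanded once).
-- Both ports work on List Char and pack with String.ofList at the end: Python's str '<' used by
-- sorted IS Lean's '<' on .toList (PYSEM), so sorting the char lists is exact.

-- ===== PORT A =====
-- A: for i in range(len(domain)): subdomain = domain[0:i] + domain[i+1:len(domain)];
--    domains.add(subdomain); if subs > 1: domains = domains.union(recursion); return sorted(domains)
def apsA (d : List Char) (subs : Int) : List (List Char) :=
  let domains := (List.range d.length).attach.foldl
    (fun (acc : PySem.Set (List Char)) i =>
      let sub := PySem.List.slice d (some 0) (some (i.1 : Int)) ++
                 PySem.List.slice d (some ((i.1 : Int) + 1)) (some (d.length : Int))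
      let acc := PySem.Set.add acc sub
      if subs > 1 then PySem.Set.union acc (PySem.Set.ofList (apsA sub (subs - 1))) else acc)
    PySem.Set.empty
  PySem.List.sorted domains (fun x => x) false
termination_by d.length
decreasing_by
  have hi : i.1 < d.length := List.mem_range.mp i.2
  have h0 : PySem.List.slice d (some 0) (some (i.1 : Int)) = d.take i.1 := by
    simp [PySem.List.slice_to_natCast d i.1]
  have h1 : PySem.List.slice d (some ((i.1 : Int) + 1)) (some (d.length : Int)) = d.drop (i.1 + 1) := by
    have h := PySem.List.slice_natCast d (i.1 + 1) d.length
    push_cast at h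
    rw [h]
    exact List.take_of_length_le (by simp)
  simp [h0, h1, List.length_take, List.length_drop]
  omega

def all_possible_subs (domain : String) (subs : Int) : List String :=
  (apsA domain.toList subs).map String.ofList

-- ===== PORT B =====
-- B: nxt.add(s[:i] + s[i+1:]) for i in range(len(s)), for each s of the current level
def delOnce (s : List Char) (nx : PySem.Set (List Char)) : PySem.Set (List Char) :=
  (List.range s.length).foldl
    (fun nx2 (i : Nat) =>
      PySem.Set.add nx2 (PySem.List.slice s none (some (i : Int)) ++
                         PySem.List.slice s (some ((i : Int) + 1)) none))
    nx

-- B: depth = min(max(subs,1), len); state = (result, level); depth rounds of level expansion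
def apsB (d : List Char) (subs : Int) : List (List Char) :=
  let depth := (min (max subs 1) (d.length : Int)).toNat
  let st := (List.range depth).foldl
    (fun (st : PySem.Set (List Char) × PySem.Set (List Char)) _ =>
      let nxt := st.2.foldl (fun nx s => delOnce s nx) PySem.Set.empty
      (PySem.Set.union st.1 nxt, nxt))
    (PySem.Set.empty, PySem.Set.ofList [d])
  PySem.List.sorted st.1 (fun x => x) false

def all_possible_subs_alt (domain : String) (subs : Int) : List String :=
  (apsB domain.toList subs).map String.ofList

-- ===== PRECONDITION & SPEC =====
def Spec_all_possible_subs (domain : String) (subs : Int) (out : List String) : Prop := out = all_possible_subs_alt domain subs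
instance (domain : String) (subs : Int) (out : List String) : Decidable (Spec_all_possible_subs domain subs out) := by unfold Spec_all_possible_subs; infer_instance

-- ===== CLAIM (what is proved, stated in full; the proofs are below) =====
def Claim_equal_all_possible_subs : Prop := ∀ (domain : String) (subs : Int), Dom_all_possible_subs domain subs → Spec_all_possible_subs domain subs (all_possible_subs domain subs)

-- ===== LEMMAS AND PROOFS =====

-- x is obtained from d by deleting exactly j characters (one at a time)
def Reach : Nat → List Char → List Char → Prop
  | 0, d, x => x = d
  | j + 1, d, x => ∃ t, (∃ i < d.length, t = d.take i ++ d.drop (i + 1)) ∧ Reach j t x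

lemma reach_length {j : Nat} {d x : List Char} (h : Reach j d x) : x.length + j = d.length := by
  induction j generalizing d with
  | zero => simp [Reach] at h; simp [h]
  | succ j ih =>
    obtain ⟨t, ⟨i, hi, ht⟩, hr⟩ := h
    have := ih hr
    subst ht
    simp [List.length_take, List.length_drop] at this ⊢
    omega

lemma reach_succ_right {j : Nat} {d x : List Char} :
    Reach (j + 1) d x ↔ ∃ t, Reach j d t ∧ ∃ i < t.length, x = t.take i ++ t.drop (i + 1) := by
  induction j generalizing d with
  | zero =>
    constructor
    · rintro ⟨t, h1, h2⟩; simp [Reach] at h2; exact ⟨d, rfl, by simpa [h2] using h1⟩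
    · rintro ⟨t, h1, h2⟩; simp [Reach] at h1; exact ⟨x, by simpa [h1] using h2, rfl⟩
  | succ j ih =>
    constructor
    · rintro ⟨t, h1, h2⟩
      obtain ⟨u, hu, hdel⟩ := ih.mp h2
      exact ⟨u, ⟨t, h1, hu⟩, hdel⟩
    · rintro ⟨u, ⟨t, h1, hu⟩, hdel⟩
      exact ⟨t, h1, ih.mpr ⟨u, hu, hdel⟩⟩

lemma sliceA_eq (d : List Char) (i : Nat) :
    PySem.List.slice d (some 0) (some (i : Int)) ++
      PySem.List.slice d (some ((i : Int) + 1)) (some (d.length : Int)) =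
    d.take i ++ d.drop (i + 1) := by
  have h0 : PySem.List.slice d (some 0) (some (i : Int)) = d.take i := by
    simp [PySem.List.slice_to_natCast d i]
  have h1 : PySem.List.slice d (some ((i : Int) + 1)) (some (d.length : Int)) = d.drop (i + 1) := by
    have h := PySem.List.slice_natCast d (i + 1) d.length
    push_cast at h
    rw [h]
    exact List.take_of_length_le (by simp)
  rw [h0, h1]

lemma sliceB_eq (s : List Char) (i : Nat) :
    PySem.List.slice s none (some (i : Int)) ++ PySem.List.slice s (some ((i : Int) + 1)) none =
    s.take i ++ s.drop (i + 1) := by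
  have h1 : PySem.List.slice s (some ((i : Int) + 1)) none = s.drop (i + 1) := by
    have h := PySem.List.slice_from_natCast s (i + 1)
    push_cast at h
    exact h
  rw [PySem.List.slice_to_natCast, h1]

lemma foldl_set_nodup {β : Type} (l : List β) (f : PySem.Set (List Char) → β → PySem.Set (List Char))
    (h : ∀ s b, List.Nodup s → List.Nodup (f s b)) (s : PySem.Set (List Char)) (hs : List.Nodup s) :
    List.Nodup (l.foldl f s) := by
  induction l generalizing s with
  | nil => exact hs
  | cons b l ih => exact ih _ (h _ _ hs)

lemma mem_foldA (d : List Char) (subs : Int) (l : List {i // i ∈ List.range d.length})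
    (acc : PySem.Set (List Char)) (x : List Char) :
    x ∈ l.foldl
      (fun (acc : PySem.Set (List Char)) i =>
        let sub := PySem.List.slice d (some 0) (some (i.1 : Int)) ++
                   PySem.List.slice d (some ((i.1 : Int) + 1)) (some (d.length : Int))
        let acc := PySem.Set.add acc sub
        if subs > 1 then PySem.Set.union acc (PySem.Set.ofList (apsA sub (subs - 1))) else acc)
      acc ↔
    x ∈ acc ∨ ∃ i ∈ l, (x = d.take i.1 ++ d.drop (i.1 + 1) ∨
      (subs > 1 ∧ x ∈ apsA (d.take i.1 ++ d.drop (i.1 + 1)) (subs - 1))) := by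
  induction l generalizing acc with
  | nil => simp
  | cons a l ih =>
    rw [List.foldl_cons, ih]
    simp only [sliceA_eq, List.mem_cons]
    split_ifs with h <;>
      simp only [PySem.Set.mem_union, PySem.Set.mem_add, PySem.Set.mem_ofList] <;>
      constructor
    · rintro (((hx | hx) | hx) | ⟨i, hi, hP⟩)
      · exact Or.inl hx
      · exact Or.inr ⟨a, Or.inl rfl, Or.inl hx⟩
      · exact Or.inr ⟨a, Or.inl rfl, Or.inr ⟨h, hx⟩⟩
      · exact Or.inr ⟨i, Or.inr hi, hP⟩
    · rintro (hx | ⟨i, (rfl | hi), (hP | ⟨-, hP⟩)⟩)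
      · exact Or.inl (Or.inl (Or.inl hx))
      · exact Or.inl (Or.inl (Or.inr hP))
      · exact Or.inl (Or.inr hP)
      · exact Or.inr ⟨i, hi, Or.inl hP⟩
      · exact Or.inr ⟨i, hi, Or.inr ⟨h, hP⟩⟩
    · rintro ((hx | hx) | ⟨i, hi, hP⟩)
      · exact Or.inl hx
      · exact Or.inr ⟨a, Or.inl rfl, Or.inl hx⟩
      · exact Or.inr ⟨i, Or.inr hi, hP⟩
    · rintro (hx | ⟨i, (rfl | hi), (hP | ⟨hs, -⟩)⟩)
      · exact Or.inl (Or.inl hx)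
      · exact Or.inl (Or.inr hP)
      · exact absurd hs h
      · exact Or.inr ⟨i, hi, Or.inl hP⟩
      · exact absurd hs h

lemma mem_apsA (d : List Char) (subs : Int) (x : List Char) :
    x ∈ apsA d subs ↔ ∃ j : Nat, 1 ≤ j ∧ (j : Int) ≤ max subs 1 ∧ Reach j d x := by
  suffices H : ∀ n (d : List Char), d.length ≤ n → ∀ (subs : Int) (x : List Char),
      (x ∈ apsA d subs ↔ ∃ j : Nat, 1 ≤ j ∧ (j : Int) ≤ max subs 1 ∧ Reach j d x) from
    H d.length d le_rfl subs x
  intro n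
  induction n with
  | zero =>
    intro d hd subs x
    have hd0 : d = [] := List.length_eq_zero_iff.mp (Nat.le_zero.mp hd)
    subst hd0
    rw [apsA]
    simp only [PySem.List.mem_sorted]
    constructor
    · intro h; simp at h
    · rintro ⟨j, hj1, -, hr⟩
      have := reach_length hr
      omega
  | succ n ih =>
    intro d hd subs x
    rw [apsA]
    simp only [PySem.List.mem_sorted, mem_foldA]
    have hdel : ∀ i : Nat, i < d.length → (d.take i ++ d.drop (i + 1)).length ≤ n := by
      intro i hi
      simp only [List.length_append, List.length_take, List.length_drop]
      omega
    constructor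
    · rintro (h | ⟨i, -, (hx | ⟨hs, hmem⟩)⟩)
      · simp [PySem.Set.empty] at h
      · refine ⟨1, le_refl 1, by omega, x, ⟨i.1, List.mem_range.mp i.2, hx⟩, rfl⟩
      · have hi := List.mem_range.mp i.2
        obtain ⟨j, hj1, hj2, hr⟩ := (ih _ (hdel i.1 hi) (subs - 1) x).mp hmem
        refine ⟨j + 1, by omega, by push_cast; omega,
          d.take i.1 ++ d.drop (i.1 + 1), ⟨i.1, hi, rfl⟩, hr⟩
    · rintro ⟨j, hj1, hj2, hr⟩
      match j, hj1 with
      | 1, _ =>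
        obtain ⟨t, ⟨i, hi, ht⟩, hr0⟩ := hr
        have hx : x = t := hr0
        exact Or.inr ⟨⟨i, List.mem_range.mpr hi⟩, List.mem_attach _ _, Or.inl (hx.trans ht)⟩
      | (k + 2), _ =>
        obtain ⟨t, ⟨i, hi, ht⟩, hr'⟩ := hr
        have hs : subs > 1 := by omega
        refine Or.inr ⟨⟨i, List.mem_range.mpr hi⟩, List.mem_attach _ _, Or.inr ⟨hs, ?_⟩⟩
        rw [ih _ (by subst ht; exact hdel i hi) (subs - 1) x]
        exact ⟨k + 1, by omega, by push_cast at hj2 ⊢; omega, ht ▸ hr'⟩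

lemma mem_delOnce (s : List Char) (nx : PySem.Set (List Char)) (x : List Char) :
    x ∈ delOnce s nx ↔ x ∈ nx ∨ ∃ i < s.length, x = s.take i ++ s.drop (i + 1) := by
  unfold delOnce
  rw [show (fun (nx2 : PySem.Set (List Char)) (i : Nat) =>
        PySem.Set.add nx2 (PySem.List.slice s none (some (i : Int)) ++
          PySem.List.slice s (some ((i : Int) + 1)) none)) =
      (fun nx2 (i : Nat) => PySem.Set.add nx2 ((fun i => s.take i ++ s.drop (i + 1)) i)) from
    funext fun nx2 => funext fun i => by rw [sliceB_eq]]
  rw [PySem.Set.mem_foldl_add]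
  simp [List.mem_range]

-- the state of B's outer loop after m rounds (the literal fold from apsB)
def stB (d : List Char) (m : Nat) : PySem.Set (List Char) × PySem.Set (List Char) :=
  (List.range m).foldl
    (fun (st : PySem.Set (List Char) × PySem.Set (List Char)) _ =>
      let nxt := st.2.foldl (fun nx s => delOnce s nx) PySem.Set.empty
      (PySem.Set.union st.1 nxt, nxt))
    (PySem.Set.empty, PySem.Set.ofList [d])

lemma apsB_eq (d : List Char) (subs : Int) :
    apsB d subs = PySem.List.sorted (stB d ((min (max subs 1) (d.length : Int)).toNat)).1
      (fun x => x) false := rfl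

lemma mem_foldl_delOnce (l : List (List Char)) (nx : PySem.Set (List Char)) (x : List Char) :
    x ∈ l.foldl (fun nx s => delOnce s nx) nx ↔
    x ∈ nx ∨ ∃ s ∈ l, ∃ i < s.length, x = s.take i ++ s.drop (i + 1) := by
  induction l generalizing nx with
  | nil => simp
  | cons a l ih =>
    rw [List.foldl_cons, ih, mem_delOnce]
    simp only [List.mem_cons]
    constructor
    · rintro ((h | h) | ⟨s, hs, h⟩)
      · exact Or.inl h
      · exact Or.inr ⟨a, Or.inl rfl, h⟩
      · exact Or.inr ⟨s, Or.inr hs, h⟩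
    · rintro (h | ⟨s, (rfl | hs), h⟩)
      · exact Or.inl (Or.inl h)
      · exact Or.inl (Or.inr h)
      · exact Or.inr ⟨s, hs, h⟩

lemma nodup_delOnce (s : List Char) (nx : PySem.Set (List Char)) (h : List.Nodup nx) :
    List.Nodup (delOnce s nx) := by
  unfold delOnce
  exact foldl_set_nodup _ _ (fun s b hs => PySem.Set.nodup_add _ _ hs) _ h

lemma stB_spec (d : List Char) (m : Nat) :
    (∀ x, x ∈ (stB d m).2 ↔ Reach m d x) ∧
    (∀ x, x ∈ (stB d m).1 ↔ ∃ j : Nat, 1 ≤ j ∧ j ≤ m ∧ Reach j d x) ∧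
    List.Nodup (stB d m).1 ∧ List.Nodup (stB d m).2 := by
  induction m with
  | zero =>
    refine ⟨fun x => ?_, fun x => ?_, by simp [stB, PySem.Set.empty], by simp [stB]⟩
    · simp [stB, Reach, PySem.Set.mem_ofList, eq_comm]
    · simp only [stB, List.range_zero, List.foldl_nil]
      constructor
      · intro h; simp [PySem.Set.empty] at h
      · rintro ⟨j, hj1, hj2, -⟩; omega
  | succ m ih =>
    obtain ⟨ih2, ih1, ihn1, ihn2⟩ := ih
    have hstep : stB d (m + 1) =
        (PySem.Set.union (stB d m).1 ((stB d m).2.foldl (fun nx s => delOnce s nx) PySem.Set.empty),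
         (stB d m).2.foldl (fun nx s => delOnce s nx) PySem.Set.empty) := by
      unfold stB
      rw [List.range_succ, List.foldl_append]
      rfl
    have hnxt : ∀ x, x ∈ (stB d m).2.foldl (fun nx s => delOnce s nx) PySem.Set.empty ↔
        Reach (m + 1) d x := by
      intro x
      rw [mem_foldl_delOnce, reach_succ_right]
      constructor
      · rintro (h | ⟨s, hs, h⟩)
        · simp [PySem.Set.empty] at h
        · exact ⟨s, (ih2 s).mp hs, h⟩
      · rintro ⟨s, hs, h⟩
        exact Or.inr ⟨s, (ih2 s).mpr hs, h⟩
    have hnodupnxt : List.Nodup ((stB d m).2.foldl (fun nx s => delOnce s nx) PySem.Set.empty) :=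
      foldl_set_nodup _ _ (fun s b hs => nodup_delOnce _ _ hs) _ (by simp [PySem.Set.empty])
    refine ⟨fun x => ?_, fun x => ?_, ?_, ?_⟩
    · rw [hstep]; exact hnxt x
    · rw [hstep]
      simp only [PySem.Set.mem_union, ih1, hnxt]
      constructor
      · rintro (⟨j, hj1, hj2, hr⟩ | hr)
        · exact ⟨j, hj1, by omega, hr⟩
        · exact ⟨m + 1, by omega, le_refl _, hr⟩
      · rintro ⟨j, hj1, hj2, hr⟩
        rcases Nat.lt_or_ge j (m + 1) with h | h
        · exact Or.inl ⟨j, hj1, by omega, hr⟩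
        · have : j = m + 1 := by omega
          subst this
          exact Or.inr hr
    · rw [hstep]; exact PySem.Set.nodup_union _ _ ihn1
    · rw [hstep]; exact hnodupnxt

lemma apsA_eq_apsB (d : List Char) (subs : Int) : apsA d subs = apsB d subs := by
  rw [apsB_eq]
  set m := (min (max subs 1) (d.length : Int)).toNat with hm
  obtain ⟨-, hmem, hnd1, -⟩ := stB_spec d m
  have hconv : ∀ (xs : List (List Char)),
      @PySem.List.sorted (List Char) (List Char) List.instLT (fun a b => a.decidableLT b) xs
        (fun x => x) false =
      @PySem.List.sorted (List Char) (List Char) List.instLinearOrder.toLT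
        LinearOrder.toDecidableLT xs (fun x => x) false := by
    intro xs
    congr 1
  rw [hconv]
  refine (PySem.List.sorted_eq_of_perm_of_pairwise_lt (stB d m).1 (apsA d subs) (fun x => x) ?_ ?_).symm
  · -- apsA d subs is a permutation of (stB d m).1
    refine (List.perm_ext_iff_of_nodup ?_ hnd1).mpr ?_
    · -- apsA's output is sorted(set), hence Nodup
      have : List.Nodup ((List.range d.length).attach.foldl
        (fun (acc : PySem.Set (List Char)) i =>
          let sub := PySem.List.slice d (some 0) (some (i.1 : Int)) ++
                     PySem.List.slice d (some ((i.1 : Int) + 1)) (some (d.length : Int))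
          let acc := PySem.Set.add acc sub
          if subs > 1 then PySem.Set.union acc (PySem.Set.ofList (apsA sub (subs - 1))) else acc)
        PySem.Set.empty) := by
        apply foldl_set_nodup
        · intro s b hs
          simp only
          split
          · exact PySem.Set.nodup_union _ _ (PySem.Set.nodup_add _ _ hs)
          · exact PySem.Set.nodup_add _ _ hs
        · simp [PySem.Set.empty]
      rw [apsA]
      exact ((PySem.List.sorted_perm _ _ _).nodup_iff).mpr this
    · intro x
      rw [mem_apsA, hmem x]
      constructor
      · rintro ⟨j, hj1, hj2, hr⟩
        have hlen := reach_length hr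
        exact ⟨j, hj1, by omega, hr⟩
      · rintro ⟨j, hj1, hj2, hr⟩
        exact ⟨j, hj1, by omega, hr⟩
  · -- apsA's output is strictly increasing: Pairwise ≤ from sortedness, ≠ from Nodup
    have hle : (apsA d subs).Pairwise (fun a b => a ≤ b) := by
      rw [apsA]
      rw [hconv]
      exact PySem.List.sorted_pairwise _ _
    have hnd : (apsA d subs).Nodup := by
      rw [apsA]
      refine ((PySem.List.sorted_perm _ _ _).nodup_iff).mpr ?_
      apply foldl_set_nodup
      · intro s b hs
        simp only
        split
        · exact PySem.Set.nodup_union _ _ (PySem.Set.nodup_add _ _ hs)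
        · exact PySem.Set.nodup_add _ _ hs
      · simp [PySem.Set.empty]
    exact (hle.and hnd).imp fun h => lt_of_le_of_ne h.1 h.2

-- ===== VERDICT (by name: the statement is the Claim_ definition above) =====
theorem all_possible_subs_spec : Claim_equal_all_possible_subs := by
  intro domain subs _
  unfold Spec_all_possible_subs all_possible_subs all_possible_subs_alt
  rw [apsA_eq_apsB]
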